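-- pv_equiv track=rewrite | github.com/ShokofehVS/SecBic-CCA | build/lib/SecBiclib/algorithms/cipher_operations.py | _ones
-- ===== SOURCE A (Python) =====
-- def _ones(start, end, length):
--     if not start:
--         if end:
--             return [1 if i in range(end) else 0 for i in range(length)]
--         else:
--             raise ValueError("Start and end arguments cannot both be None")
--     elif not end:
--         return [1 if i in range(start,length) else 0 for i in range(length)]
--     else:
--         raise NotImplementedError("Not yet implemented returning ones array between both start and end value")
-- ===== SOURCE B (Python) =====
-- def _ones(start, end, length):
--     if not start:
--         if end:
--             k = min(max(end, 0), length)
--             return [1] * k + [0] * (length - k)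
--         else:
--             raise ValueError("Start and end arguments cannot both be None")
--     elif not end:
--         z = min(max(start, 0), length)
--         return [0] * z + [1] * (length - z)
--     else:
--         raise NotImplementedError("Not yet implemented returning ones array between both start and end value")
-- ===== Notes on version B (the rewrite author's own statement) =====
-- stated objective: simpler
-- what changed: Builds the mask directly as two constant runs with clamped list multiplication and concatenation ([1]*k + [0]*(length-k)) instead of scanning every index with a comprehension and a range-membership test.
import Mathlib
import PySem

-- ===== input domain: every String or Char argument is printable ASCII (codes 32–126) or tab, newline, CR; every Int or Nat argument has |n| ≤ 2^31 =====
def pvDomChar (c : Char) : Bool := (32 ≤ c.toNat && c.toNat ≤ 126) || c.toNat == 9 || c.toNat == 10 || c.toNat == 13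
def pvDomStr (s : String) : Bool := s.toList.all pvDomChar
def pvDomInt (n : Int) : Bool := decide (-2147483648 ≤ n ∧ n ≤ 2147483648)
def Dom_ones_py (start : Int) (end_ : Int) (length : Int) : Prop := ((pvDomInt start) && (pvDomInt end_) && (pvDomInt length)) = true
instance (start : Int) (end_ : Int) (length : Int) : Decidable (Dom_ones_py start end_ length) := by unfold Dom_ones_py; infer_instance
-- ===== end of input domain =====

-- B builds the mask as two constant runs ([1]*k + [0]*rest) instead of testing each index's
-- membership in a range; same three-branch control flow, the two raising branches are outside Pre_.

-- ===== PORT A =====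
-- raising branches (ValueError / NotImplementedError) return [] here; Pre_ excludes them
def ones_py (start : Int) (end_ : Int) (length : Int) : List Int :=
  if start = 0 then
    if end_ ≠ 0 then
      -- 'i in range(end)' is Python's O(1) arithmetic range-membership test: 0 ≤ i < end
      (PySem.List.pyRange 0 length 1).map
        (fun i => if 0 ≤ i ∧ i < end_ then (1 : Int) else 0)
    else []
  else if end_ = 0 then
    -- 'i in range(start, length)' likewise: start ≤ i < length
    (PySem.List.pyRange 0 length 1).map
      (fun i => if start ≤ i ∧ i < length then (1 : Int) else 0)
  else []

-- ===== PORT B =====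
def ones_py_alt (start : Int) (end_ : Int) (length : Int) : List Int :=
  if start = 0 then
    if end_ ≠ 0 then
      -- k = min(max(end, 0), length)
      List.replicate (min (max end_ 0) length).toNat 1
        ++ List.replicate (length - min (max end_ 0) length).toNat 0
    else []
  else if end_ = 0 then
    -- z = min(max(start, 0), length)
    List.replicate (min (max start 0) length).toNat 0
        ++ List.replicate (length - min (max start 0) length).toNat 1
  else []

-- ===== PRECONDITION & SPEC =====
-- A raises (ValueError when both start and end are falsy, NotImplementedError when both are
-- truthy); Pre_ admits exactly the two branches that return.
def Pre_ones_py (start : Int) (end_ : Int) (length : Int) : Prop :=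
  (start = 0 ∧ end_ ≠ 0) ∨ (start ≠ 0 ∧ end_ = 0)
instance (start : Int) (end_ : Int) (length : Int) : Decidable (Pre_ones_py start end_ length) := by unfold Pre_ones_py; infer_instance
def pvWitness_ones_py : Int × Int × Int := (0, 3, 5)

def Spec_ones_py (start : Int) (end_ : Int) (length : Int) (out : List Int) : Prop := out = ones_py_alt start end_ length
instance (start : Int) (end_ : Int) (length : Int) (out : List Int) : Decidable (Spec_ones_py start end_ length out) := by unfold Spec_ones_py; infer_instance

-- ===== CLAIM (what is proved, stated in full; the proofs are below) =====
def Claim_equal_ones_py : Prop := ∀ (start : Int) (end_ : Int) (length : Int), Dom_ones_py start end_ length → Pre_ones_py start end_ length → Spec_ones_py start end_ length (ones_py start end_ length)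

-- ===== LEMMAS AND PROOFS =====

lemma range_map_lt (n m : Nat) :
    (List.range n).map (fun k => if k < m then (1 : Int) else 0)
      = List.replicate (min m n) 1 ++ List.replicate (n - min m n) 0 := by
  apply List.ext_getElem
  · simp
  · intro i h1 h2
    simp only [List.length_map, List.length_range] at h1
    simp only [List.getElem_map, List.getElem_range]
    by_cases hi : i < min m n
    · rw [List.getElem_append_left (by simp; omega)]
      simp only [List.getElem_replicate]
      rw [if_pos (by omega)]
    · rw [List.getElem_append_right (by simp; omega)]
      simp only [List.getElem_replicate]
      rw [if_neg (by omega)]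

lemma range_map_ge (n m : Nat) :
    (List.range n).map (fun k => if m ≤ k then (1 : Int) else 0)
      = List.replicate (min m n) 0 ++ List.replicate (n - min m n) 1 := by
  apply List.ext_getElem
  · simp
  · intro i h1 h2
    simp only [List.length_map, List.length_range] at h1
    simp only [List.getElem_map, List.getElem_range]
    by_cases hi : i < min m n
    · rw [List.getElem_append_left (by simp; omega)]
      simp only [List.getElem_replicate]
      rw [if_neg (by omega)]
    · rw [List.getElem_append_right (by simp; omega)]
      simp only [List.getElem_replicate]
      rw [if_pos (by omega)]

theorem ones_py_spec : Claim_equal_ones_py := by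
  intro start end_ length _ hpre
  unfold Spec_ones_py ones_py ones_py_alt
  rcases hpre with ⟨hs, he⟩ | ⟨hs, he⟩
  · rw [if_pos hs, if_pos hs, if_pos he, if_pos he]
    rw [PySem.List.pyRange_one 0 length]
    rw [List.map_map]
    have hfun : ((fun i => if 0 ≤ i ∧ i < end_ then (1 : Int) else 0) ∘
        fun k : Nat => (0 : Int) + k) = fun k : Nat => if k < end_.toNat then (1 : Int) else 0 := by
      funext k
      simp only [Function.comp]
      split_ifs <;> first | rfl | omega
    rw [hfun, range_map_lt]
    have h1 : (min (max end_ 0) length).toNat = min end_.toNat (length - 0).toNat := by omega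
    have h2 : (length - min (max end_ 0) length).toNat
        = (length - 0).toNat - min end_.toNat (length - 0).toNat := by omega
    rw [h1, h2]
  · rw [if_neg hs, if_neg hs, if_pos he, if_pos he]
    rw [PySem.List.pyRange_one 0 length]
    rw [List.map_map]
    rw [List.map_congr_left (g := fun k : Nat => if start.toNat ≤ k then (1 : Int) else 0)
      (by
        intro k hk
        rw [List.mem_range] at hk
        simp only [Function.comp]
        split_ifs <;> first | rfl | omega)]
    rw [range_map_ge]
    have h1 : (min (max start 0) length).toNat = min start.toNat (length - 0).toNat := by omega
    have h2 : (length - min (max start 0) length).toNat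
        = (length - 0).toNat - min start.toNat (length - 0).toNat := by omega
    rw [h1, h2]
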